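-- pv_equiv track=rewrite | github.com/bivex/pya-ns | tests/fixtures/control_flow.py | loop_else
-- ===== SOURCE A (Python) =====
-- def loop_else(limit: int) -> int:
--     total = 0
--     for value in range(limit):
--         total += value
--     else:
--         total += 100
--
--     while total < 0:
--         total += 1
--     else:
--         total += 1
--
--     return total
-- ===== SOURCE B (Python) =====
-- def loop_else(limit: int) -> int:
--     n = max(limit, 0)
--     return n * (n - 1) // 2 + 101
-- ===== Notes on version B (the rewrite author's own statement) =====
-- stated objective: faster
-- what changed: replaced the summation loop over range(limit) (and the never-entered while loop) by a constant-time closed-form arithmetic-series formula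
import Mathlib
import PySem

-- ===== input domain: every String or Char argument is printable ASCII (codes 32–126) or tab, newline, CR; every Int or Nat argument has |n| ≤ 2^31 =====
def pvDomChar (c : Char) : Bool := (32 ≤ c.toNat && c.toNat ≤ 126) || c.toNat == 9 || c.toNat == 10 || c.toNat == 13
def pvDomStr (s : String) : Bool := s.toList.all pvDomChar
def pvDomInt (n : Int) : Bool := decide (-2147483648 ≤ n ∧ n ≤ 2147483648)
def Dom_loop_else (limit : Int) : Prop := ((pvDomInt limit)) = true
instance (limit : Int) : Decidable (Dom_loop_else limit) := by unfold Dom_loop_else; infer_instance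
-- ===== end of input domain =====

-- B replaces A's O(limit) summation loop by the closed-form arithmetic series (O(1)); return values agree everywhere.


-- ===== PORT A =====
-- 'while total < 0: total += 1' as structural recursion on (-total).toNat
def loopElseWhile (t : Int) : Int :=
  if t < 0 then loopElseWhile (t + 1) else t
termination_by (-t).toNat
decreasing_by omega

def loop_else (limit : Int) : Int :=
  -- total = 0; for value in range(limit): total += value; else: total += 100
  -- then: while total < 0: total += 1; else: total += 1
  loopElseWhile ((PySem.List.pyRange 0 limit 1).foldl (fun acc v => acc + v) 0 + 100) + 1

-- ===== PORT B =====
def loop_else_alt (limit : Int) : Int :=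
  PySem.Int.floordiv (max limit 0 * (max limit 0 - 1)) 2 + 101

-- ===== PRECONDITION & SPEC =====
def Spec_loop_else (limit : Int) (out : Int) : Prop := out = loop_else_alt limit
instance (limit : Int) (out : Int) : Decidable (Spec_loop_else limit out) := by unfold Spec_loop_else; infer_instance

-- ===== CLAIM (what is proved, stated in full; the proofs are below) =====
def Claim_equal_loop_else : Prop := ∀ (limit : Int), Dom_loop_else limit → Spec_loop_else limit (loop_else limit)

-- ===== LEMMAS AND PROOFS =====

-- Gauss: twice the loop's running sum over range m equals m*(m-1), in Int.
theorem pv_two_mul_sum (m : Nat) :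
    2 * (((List.range m).map (fun k : Nat => (k : Int))).foldl (fun a b => a + b) 0) = (m : Int) * ((m : Int) - 1) := by
  induction m with
  | zero => simp
  | succ m ih =>
    rw [List.range_succ, List.map_append, List.foldl_append]
    simp only [List.map_cons, List.map_nil, List.foldl_cons, List.foldl_nil]
    have hc : ((m + 1 : Nat) : Int) = (m : Int) + 1 := by push_cast; ring
    rw [hc]
    linear_combination ih

theorem pv_while_of_nonneg (t : Int) (h : 0 ≤ t) : loopElseWhile t = t := by
  unfold loopElseWhile
  rw [if_neg (by omega)]

-- ===== VERDICT (by name: the statement is the Claim_ definition above) =====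
theorem loop_else_spec : Claim_equal_loop_else := by
  intro limit _
  unfold Spec_loop_else loop_else loop_else_alt
  have hrange : PySem.List.pyRange 0 limit 1 = (List.range limit.toNat).map (fun k : Nat => (k : Int)) := by
    rw [PySem.List.pyRange_one]
    simp
  rw [hrange]
  set S := ((List.range limit.toNat).map (fun k : Nat => (k : Int))).foldl (fun a b => a + b) 0 with hS
  have h2 := pv_two_mul_sum limit.toNat
  rw [← hS] at h2
  have hn : max limit 0 = (limit.toNat : Int) := by omega
  have hnn : (0:Int) ≤ (limit.toNat : Int) * ((limit.toNat : Int) - 1) := by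
    rcases Nat.eq_zero_or_pos limit.toNat with h | h
    · simp [h]
    · have h1 : (1:Int) ≤ (limit.toNat : Int) := by exact_mod_cast h
      nlinarith
  have hSnn : 0 ≤ S := by linarith
  rw [pv_while_of_nonneg _ (by omega)]
  have : PySem.Int.floordiv (max limit 0 * (max limit 0 - 1)) 2 = S := by
    rw [hn, ← h2, PySem.Int.floordiv_eq_ediv_of_pos (by norm_num)]
    exact Int.mul_ediv_cancel_left S (by norm_num)
  simp only [this]
  ring
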